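-- pv_equiv track=rewrite | github.com/baduy9x/AlgorithmPractice | 1a_append_sort.py | compute
-- ===== SOURCE A (Python) =====
-- def compute_min_ops_2(current_item, last_item):
--     if current_item > last_item:
--         return current_item, 0
--     len_last_item = len(str(last_item))
--     len_current_item = len(str(current_item))
--     last_item_str = str(last_item)
--     new_item = current_item * (10 ** (len_last_item - len_current_item))
--     if new_item > last_item:
--         return new_item, (len_last_item - len_current_item)
--     else:
--         if int(last_item_str[0:len_current_item]) > current_item:
--             return new_item * 10, (len_last_item - len_current_item) + 1
--         else:
--             append = last_item_str[len_current_item:]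
--             nine_str = '9' * len(append)
--             if append == nine_str:
--                 return new_item * 10, (len_last_item - len_current_item) + 1
--             else:
--                 return last_item + 1, (len_last_item - len_current_item)
--
-- def compute(n, input_list):
--     result = 0
--     for i in range(1, n):
--         last_item = input_list[i - 1]
--         current_item = input_list[i]
--         new_item, current_ops = compute_min_ops_2(current_item, last_item)
--         input_list[i] = new_item
--         result += current_ops
--     return result
-- ===== SOURCE B (Python) =====
-- # B: same linear pass, but the helper finds the needed number of appended digits
-- # by an iterative numeric block search (low = cur*10**extra .. low+10**extra-1)
-- # instead of A's string-slice / all-nines branching. Intended for positive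
-- # elements (see Pre_); mutates input_list[i] like A does.
-- def compute(n, input_list):
--     result = 0
--     for i in range(1, n):
--         last = input_list[i - 1]
--         cur = input_list[i]
--         if cur > last:
--             new, ops = cur, 0
--         else:
--             extra = 1
--             while True:
--                 p = 10 ** extra
--                 low = cur * p
--                 if low + p - 1 > last:
--                     new, ops = (low, extra) if low > last else (last + 1, extra)
--                     break
--                 extra += 1
--         input_list[i] = new
--         result += ops
--     return result
-- ===== Notes on version B (the rewrite author's own statement) =====
-- stated objective: alternative
-- what changed: The helper's string-slice/len(str())/all-nines branching is replaced by a purely numeric search that increments the number of appended digits until the block [cur*10**e, cur*10**e + 10**e - 1] reaches past last, returning its low end or last+1; the outer pass is unchanged.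
-- outside the precondition, e.g. on compute(2, [-3, -12]): A returns -1, B does not finish within the time limit; on compute(2, [99, 0]): A returns 2, B returns 3
import Mathlib
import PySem

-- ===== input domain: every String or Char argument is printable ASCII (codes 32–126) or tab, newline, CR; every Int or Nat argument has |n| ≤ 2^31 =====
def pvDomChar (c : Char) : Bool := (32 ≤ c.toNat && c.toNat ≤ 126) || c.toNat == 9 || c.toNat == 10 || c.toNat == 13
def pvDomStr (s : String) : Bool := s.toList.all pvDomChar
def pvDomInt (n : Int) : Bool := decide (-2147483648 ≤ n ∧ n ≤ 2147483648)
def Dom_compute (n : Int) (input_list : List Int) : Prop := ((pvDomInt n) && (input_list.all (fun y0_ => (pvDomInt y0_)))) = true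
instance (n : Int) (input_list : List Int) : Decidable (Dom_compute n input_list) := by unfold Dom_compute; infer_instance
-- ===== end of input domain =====

-- B replaces A's string-slice/all-nines helper by a numeric block search; the
-- outer pass (which also mutates input_list[i], identically in both) is unchanged.


-- ===== PORT A =====
-- int(s) ported by hand (PySem.Int.ofStr? covers it, but here the argument is
-- always a nonempty all-digit slice of str(last_item), where this parser is exact).
def pyIntDigits? (cs : List Char) : Option Int :=
  if cs ≠ [] ∧ cs.all (fun c => '0' ≤ c && c ≤ '9') then
    some (cs.foldl (fun a c => a * 10 + ((c.toNat : Int) - 48)) 0)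
  else none

-- str(x) is ported as PySem.Int.toChars (str(n) as List Char); '10 ** e' is
-- ported with a Nat exponent (exact whenever e ≥ 0, i.e. on Pre_; Python gives
-- a float for e < 0, which Pre_ excludes).
def computeMinOps2 (current_item last_item : Int) : Int × Int :=
  if current_item > last_item then (current_item, 0)
  else
    let len_last_item : Int := PySem.List.len (PySem.Int.toChars last_item)
    let len_current_item : Int := PySem.List.len (PySem.Int.toChars current_item)
    let last_item_str := PySem.Int.toChars last_item
    let new_item := current_item * 10 ^ (len_last_item - len_current_item).toNat
    if new_item > last_item then (new_item, len_last_item - len_current_item)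
    else
      if (pyIntDigits? (PySem.List.slice last_item_str (some 0) (some len_current_item))).getD 0 > current_item then
        (new_item * 10, (len_last_item - len_current_item) + 1)
      else
        let append := PySem.List.slice last_item_str (some len_current_item) none
        let nine_str := List.replicate append.length '9'
        if append == nine_str then (new_item * 10, (len_last_item - len_current_item) + 1)
        else (last_item + 1, len_last_item - len_current_item)

def compute (n : Int) (input_list : List Int) : Int :=
  ((PySem.List.pyRange 1 n 1).foldl
    (fun st i =>
      let last_item := PySem.List.pyGetD st.1 (i - 1) 0
      let current_item := PySem.List.pyGetD st.1 i 0
      let r := computeMinOps2 current_item last_item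
      (PySem.List.pySetD st.1 i r.1, st.2 + r.2))
    (input_list, 0)).2

-- ===== PORT B =====
-- Source B's 'while True' loop; the fuel argument only makes it total (on Pre_ the
-- loop is proved to break within last+2 iterations).
def altGo (cur last : Int) (extra : Nat) (fuel : Nat) : Int × Int :=
  match fuel with
  | 0 => (0, 0)
  | fuel + 1 =>
    let p : Int := 10 ^ extra
    let low := cur * p
    if low + p - 1 > last then
      if low > last then (low, (extra : Int)) else (last + 1, (extra : Int))
    else altGo cur last (extra + 1) fuel

def compute_alt (n : Int) (input_list : List Int) : Int :=
  ((PySem.List.pyRange 1 n 1).foldl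
    (fun st i =>
      let last := PySem.List.pyGetD st.1 (i - 1) 0
      let cur := PySem.List.pyGetD st.1 i 0
      let r := if cur > last then (cur, (0 : Int)) else altGo cur last 1 (last.toNat + 2)
      (PySem.List.pySetD st.1 i r.1, st.2 + r.2))
    (input_list, 0)).2

-- ===== PRECONDITION & SPEC =====
-- Pre_ excludes n exceeding the list length (A raises IndexError) and
-- non-positive elements among the first n, on which A's sign- and
-- zero-unaware string arithmetic raises, produces float intermediates
-- (10 ** negative), or returns accidental values such as negative op counts
-- or a 'fixed' element 0 that still does not exceed its predecessor.
def Pre_compute (n : Int) (input_list : List Int) : Prop :=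
  2 ≤ n → (n ≤ (input_list.length : Int) ∧ ∀ x ∈ input_list.take n.toNat, 1 ≤ x)
instance (n : Int) (input_list : List Int) : Decidable (Pre_compute n input_list) := by
  unfold Pre_compute; infer_instance
def pvWitness_compute : Int × List Int := (3, [1, 5, 3])

def Spec_compute (n : Int) (input_list : List Int) (out : Int) : Prop := out = compute_alt n input_list
instance (n : Int) (input_list : List Int) (out : Int) : Decidable (Spec_compute n input_list out) := by unfold Spec_compute; infer_instance

-- ===== CLAIM (what is proved, stated in full; the proofs are below) =====
def Claim_equal_compute : Prop := ∀ (n : Int) (input_list : List Int), Dom_compute n input_list → Pre_compute n input_list → Spec_compute n input_list (compute n input_list)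

-- ===== LEMMAS AND PROOFS =====

theorem tdCore_append (f : Nat) : ∀ (n : Nat) (l : List Char),
    Nat.toDigitsCore 10 f n l = Nat.toDigitsCore 10 f n [] ++ l := by
  induction f with
  | zero => intro n l; simp [Nat.toDigitsCore]
  | succ f ih =>
    intro n l
    simp only [Nat.toDigitsCore]
    by_cases h : n / 10 = 0
    · simp [h]
    · simp only [if_neg h]
      rw [ih (n / 10) ((n % 10).digitChar :: l), ih (n / 10) [(n % 10).digitChar]]
      simp

theorem tdCore_fuel : ∀ (n f f' : Nat), n < f → n < f' →
    Nat.toDigitsCore 10 f n [] = Nat.toDigitsCore 10 f' n [] := by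
  intro n
  induction n using Nat.strong_induction_on with
  | _ n ih =>
    intro f f' hf hf'
    match f, f' with
    | f + 1, f' + 1 =>
      simp only [Nat.toDigitsCore]
      by_cases h : n / 10 = 0
      · simp [h]
      · simp only [if_neg h]
        rw [tdCore_append f, tdCore_append f']
        have hlt : n / 10 < n := Nat.div_lt_self (Nat.pos_of_ne_zero (by omega)) (by norm_num)
        rw [ih (n / 10) hlt f f' (by omega) (by omega)]

theorem td_small {x : Nat} (h : x < 10) : Nat.toDigits 10 x = [Nat.digitChar x] := by
  simp [Nat.toDigits, Nat.toDigitsCore, Nat.div_eq_of_lt h, Nat.mod_eq_of_lt h]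

theorem td_step {x : Nat} (h : 10 ≤ x) :
    Nat.toDigits 10 x = Nat.toDigits 10 (x / 10) ++ [Nat.digitChar (x % 10)] := by
  have h0 : x / 10 ≠ 0 := by omega
  unfold Nat.toDigits
  conv_lhs => simp only [Nat.toDigitsCore, if_neg h0]
  rw [tdCore_append x]
  rw [tdCore_fuel (x / 10) x (x / 10 + 1) (by omega) (by omega)]

theorem td_len_pos (x : Nat) : 1 ≤ (Nat.toDigits 10 x).length := by
  by_cases h : x < 10
  · simp [td_small h]
  · rw [td_step (by omega)]; simp

theorem td_bounds : ∀ x : Nat, 1 ≤ x →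
    10 ^ ((Nat.toDigits 10 x).length - 1) ≤ x ∧ x < 10 ^ (Nat.toDigits 10 x).length := by
  intro x
  induction x using Nat.strong_induction_on with
  | _ x ih =>
    intro hx
    by_cases h : x < 10
    · rw [td_small h]; simpa using ⟨hx, h⟩
    · rw [td_step (by omega)]
      have hq : 1 ≤ x / 10 := by omega
      have := ih (x / 10) (by omega) hq
      obtain ⟨h1, h2⟩ := this
      set k := (Nat.toDigits 10 (x / 10)).length with hk
      have hk1 : 1 ≤ k := td_len_pos _
      constructor
      · simp only [List.length_append, List.length_cons, List.length_nil]
        have : 10 ^ (k + 1 - 1) = 10 * 10 ^ (k - 1) := by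
          rw [Nat.add_sub_cancel]
          conv_lhs => rw [show k = (k-1)+1 by omega]
          ring
        rw [this]
        omega
      · simp only [List.length_append, List.length_cons, List.length_nil]
        have h3 : x < 10 * (x / 10) + 10 := by omega
        have : 10 * (x / 10) + 10 ≤ 10 * 10 ^ k := by omega
        calc x < 10 * 10 ^ k := by omega
        _ = 10 ^ (k + 1) := by ring

def tailChars : Nat → Nat → List Char
  | 0, _ => []
  | m + 1, x => tailChars m (x / 10) ++ [Nat.digitChar (x % 10)]

theorem tailChars_length (m x : Nat) : (tailChars m x).length = m := by
  induction m generalizing x with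
  | zero => simp [tailChars]
  | succ m ih => simp [tailChars, ih]

theorem td_decomp : ∀ (m x : Nat), 10 ^ m ≤ x →
    Nat.toDigits 10 x = Nat.toDigits 10 (x / 10 ^ m) ++ tailChars m x := by
  intro m
  induction m with
  | zero => intro x _; simp [tailChars]
  | succ m ih =>
    intro x hx
    have hpow : 10 ^ m ≥ 1 := Nat.one_le_pow _ _ (by norm_num)
    have h10 : 10 ≤ x := by
      have : 10 ^ (m + 1) ≥ 10 := by
        calc 10 ^ (m+1) = 10 * 10 ^ m := by ring
        _ ≥ 10 * 1 := by omega
        _ = 10 := by norm_num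
      omega
    rw [td_step h10]
    have hdiv : 10 ^ m ≤ x / 10 := by
      rw [Nat.le_div_iff_mul_le (by norm_num)]
      calc 10 ^ m * 10 = 10 ^ (m + 1) := by ring
      _ ≤ x := hx
    rw [ih (x / 10) hdiv]
    have : x / 10 / 10 ^ m = x / 10 ^ (m + 1) := by
      rw [Nat.div_div_eq_div_mul]; ring_nf
    rw [this, tailChars]
    simp

theorem digitChar_digit {r : Nat} (h : r < 10) : '0' ≤ Nat.digitChar r ∧ Nat.digitChar r ≤ '9' := by
  interval_cases r <;> decide

theorem digitChar_val {r : Nat} (h : r < 10) : (Nat.digitChar r).toNat = r + 48 := by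
  interval_cases r <;> decide

theorem digitChar_nine {r : Nat} (h : r < 10) : Nat.digitChar r = '9' ↔ r = 9 := by
  interval_cases r <;> simp <;> decide

theorem td_digits : ∀ (x : Nat), ∀ c ∈ Nat.toDigits 10 x, '0' ≤ c ∧ c ≤ '9' := by
  intro x
  induction x using Nat.strong_induction_on with
  | _ x ih =>
    intro c hc
    by_cases h : x < 10
    · rw [td_small h] at hc
      simp at hc
      exact hc ▸ digitChar_digit h
    · rw [td_step (by omega)] at hc
      simp only [List.mem_append, List.mem_singleton] at hc
      rcases hc with hc | hc
      · exact ih (x / 10) (by omega) c hc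
      · exact hc ▸ digitChar_digit (Nat.mod_lt _ (by norm_num))

theorem td_foldl_val : ∀ (x : Nat) (a : Int),
    (Nat.toDigits 10 x).foldl (fun a c => a * 10 + ((c.toNat : Int) - 48)) a = a * 10 ^ (Nat.toDigits 10 x).length + x := by
  intro x
  induction x using Nat.strong_induction_on with
  | _ x ih =>
    intro a
    by_cases h : x < 10
    · rw [td_small h]
      simp [digitChar_val h]
    · rw [td_step (by omega)]
      rw [List.foldl_append]
      rw [ih (x / 10) (by omega) a]
      have hv := digitChar_val (show x % 10 < 10 from Nat.mod_lt x (by norm_num))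
      simp only [List.foldl_cons, List.foldl_nil, List.length_append, List.length_cons,
        List.length_nil, pow_succ]
      rw [hv, ← mul_assoc]
      push_cast
      omega

theorem tailChars_nines : ∀ (m x : Nat), (tailChars m x = List.replicate m '9') ↔ x % 10 ^ m = 10 ^ m - 1 := by
  intro m
  induction m with
  | zero => intro x; simp [tailChars, Nat.mod_one]
  | succ m ih =>
    intro x
    rw [tailChars]
    have hrep : List.replicate (m+1) '9' = List.replicate m '9' ++ ['9'] := by
      rw [List.replicate_succ']
    rw [hrep]
    have hsplit : (tailChars m (x / 10) ++ [(x % 10).digitChar] = List.replicate m '9' ++ ['9'])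
        ↔ (tailChars m (x / 10) = List.replicate m '9' ∧ (x % 10).digitChar = '9') := by
      constructor
      · intro h
        have hl : (tailChars m (x / 10)).length = (List.replicate m '9' : List Char).length := by
          simp [tailChars_length]
        obtain ⟨h1, h2⟩ := List.append_inj h hl
        exact ⟨h1, by simpa using h2⟩
      · rintro ⟨h1, h2⟩; rw [h1, h2]
    rw [hsplit, ih, digitChar_nine (Nat.mod_lt x (by norm_num))]
    have hpm : 1 ≤ 10 ^ m := Nat.one_le_pow _ _ (by norm_num)
    have e1 : 10 ^ (m + 1) = 10 * 10 ^ m := by ring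
    rw [e1, Nat.mod_mul]
    have h1 : x % 10 < 10 := Nat.mod_lt x (by norm_num)
    have h2 : x / 10 % 10 ^ m < 10 ^ m := Nat.mod_lt _ (by omega)
    omega

theorem parse_toDigits (x : Nat) : pyIntDigits? (Nat.toDigits 10 x) = some (x : Int) := by
  unfold pyIntDigits?
  rw [if_pos]
  · rw [td_foldl_val x 0]
    simp
  · constructor
    · have := td_len_pos x
      intro h; rw [h] at this; simp at this
    · rw [List.all_eq_true]
      intro c hc
      have := td_digits x c hc
      simp [decide_eq_true_eq]
      exact ⟨this.1, this.2⟩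

theorem altGo_spec (c l : Int) (estar : Nat)
    (hcond : l + 2 ≤ (c + 1) * 10 ^ estar)
    (hmin : ∀ e : Nat, 1 ≤ e → e < estar → ¬ (l + 2 ≤ (c + 1) * 10 ^ e)) :
    ∀ (fuel extra : Nat), 1 ≤ extra → extra ≤ estar → estar - extra < fuel →
    altGo c l extra fuel =
      (if c * 10 ^ estar > l then (c * 10 ^ estar, (estar : Int)) else (l + 1, (estar : Int))) := by
  intro fuel
  induction fuel with
  | zero => intro extra _ _ h; omega
  | succ fuel ih =>
    intro extra h1 h2 h3
    have hring : ∀ e : Nat, (c + 1) * 10 ^ e = c * 10 ^ e + 10 ^ e := fun e => by ring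
    simp only [altGo]
    by_cases he : extra = estar
    · subst he
      have hc' := hcond
      rw [hring] at hc'
      rw [if_pos (by omega)]
    · have hlt : extra < estar := by omega
      have hne := hmin extra h1 hlt
      rw [hring] at hne
      rw [if_neg (by omega)]
      exact ih (extra + 1) (by omega) (by omega) (by omega)

theorem toChars_nonneg {n : Int} (h : 0 ≤ n) : PySem.Int.toChars n = Nat.toDigits 10 n.toNat := by
  simp [PySem.Int.toChars, not_lt.mpr h]

theorem td_len_decomp {m x : Nat} (h : 10 ^ m ≤ x) :
    (Nat.toDigits 10 x).length = (Nat.toDigits 10 (x / 10 ^ m)).length + m := by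
  rw [td_decomp m x h]; simp [tailChars_length]

theorem td_take {m x : Nat} (h : 10 ^ m ≤ x) :
    (Nat.toDigits 10 x).take (Nat.toDigits 10 (x / 10 ^ m)).length = Nat.toDigits 10 (x / 10 ^ m) := by
  rw [td_decomp m x h]; exact List.take_left

theorem td_drop {m x : Nat} (h : 10 ^ m ≤ x) :
    (Nat.toDigits 10 x).drop (Nat.toDigits 10 (x / 10 ^ m)).length = tailChars m x := by
  rw [td_decomp m x h]; exact List.drop_left

theorem td_mono {c l : Nat} (h1 : 1 ≤ c) (h : c ≤ l) :
    (Nat.toDigits 10 c).length ≤ (Nat.toDigits 10 l).length := by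
  obtain ⟨hc1, _⟩ := td_bounds c h1
  obtain ⟨_, hl2⟩ := td_bounds l (h1.trans h)
  have : 10 ^ ((Nat.toDigits 10 c).length - 1) < 10 ^ (Nat.toDigits 10 l).length := by omega
  have := (Nat.pow_lt_pow_iff_right (by norm_num : 1 < 10)).mp this
  have := td_len_pos c
  omega

theorem td_len_le {l : Nat} (h : 1 ≤ l) : (Nat.toDigits 10 l).length ≤ l := by
  obtain ⟨h1, _⟩ := td_bounds l h
  have h2 := td_len_pos l
  have : (Nat.toDigits 10 l).length - 1 < 10 ^ ((Nat.toDigits 10 l).length - 1) :=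
    Nat.lt_pow_self (by norm_num)
  omega

theorem altGo_spec_nat (c l : Nat) (estar : Nat)
    (hcond : l + 2 ≤ (c + 1) * 10 ^ estar)
    (hmin : ∀ e : Nat, 1 ≤ e → e < estar → (c + 1) * 10 ^ e ≤ l + 1)
    (h1e : 1 ≤ estar) (hfuel : estar ≤ l + 2) :
    altGo (c : Int) (l : Int) 1 (l + 2) =
      (if l < c * 10 ^ estar then (((c * 10 ^ estar : Nat) : Int), (estar : Int))
       else ((l : Int) + 1, (estar : Int))) := by
  rw [altGo_spec (c := (c : Int)) (l := (l : Int)) estar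
        (by exact_mod_cast hcond)
        (fun e he1 he2 hcon => by
          have := hmin e he1 he2
          have hcon' : l + 2 ≤ (c + 1) * 10 ^ e := by exact_mod_cast hcon
          omega)
        (l + 2) 1 (by omega) h1e (by omega)]
  by_cases h : l < c * 10 ^ estar
  · rw [if_pos (by exact_mod_cast h), if_pos h]
    norm_num
  · rw [if_neg (by exact_mod_cast h), if_neg h]

theorem helper_eq (cur last : Int) (hc : 1 ≤ cur) (hl : 1 ≤ last) :
    computeMinOps2 cur last =
      (if cur > last then (cur, (0 : Int)) else altGo cur last 1 (last.toNat + 2)) := by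
  by_cases hgt : cur > last
  · simp [computeMinOps2, hgt]
  · rw [if_neg hgt]
    have hc0 : 0 ≤ cur := by omega
    have hl0 : 0 ≤ last := by omega
    set c := cur.toNat with hcdef
    set l := last.toNat with hldef
    have hcur : cur = (c : Int) := by omega
    have hlast : last = (l : Int) := by omega
    have hc1 : 1 ≤ c := by omega
    have hcl : c ≤ l := by omega
    have hl1 : 1 ≤ l := by omega
    set Dc := (Nat.toDigits 10 c).length with hDc
    set Dl := (Nat.toDigits 10 l).length with hDl
    set d := Dl - Dc with hd
    have f1 : 1 ≤ Dc := td_len_pos c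
    have f1l : 1 ≤ Dl := td_len_pos l
    obtain ⟨f2a, f2b⟩ := td_bounds c hc1
    obtain ⟨f3a, f3b⟩ := td_bounds l hl1
    rw [← hDc] at f2a f2b
    rw [← hDl] at f3a f3b
    have f4 : Dc ≤ Dl := td_mono hc1 hcl
    have f5 : 10 ^ d ≤ l := by
      calc 10 ^ d ≤ 10 ^ (Dl - 1) := Nat.pow_le_pow_right (by norm_num) (by omega)
      _ ≤ l := f3a
    have hq : l / 10 ^ d ≥ 1 := by
      have := Nat.le_div_iff_mul_le (k := 10 ^ d) (x := 1) (y := l) (by positivity)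
      omega
    have f6 : (Nat.toDigits 10 (l / 10 ^ d)).length = Dc := by
      have := td_len_decomp (m := d) (x := l) f5
      omega
    -- unfold the A port
    simp only [computeMinOps2, PySem.List.len_eq, hcur, hlast,
      toChars_nonneg (by positivity : (0:Int) ≤ (c:Int)),
      toChars_nonneg (by positivity : (0:Int) ≤ (l:Int)), Int.toNat_natCast]
    rw [if_neg (by omega)]
    have e1 : ((Dl : Int) - (Dc : Int)).toNat = d := by omega
    have e2 : PySem.List.slice (Nat.toDigits 10 l) (some 0) (some (Dc : Int)) = Nat.toDigits 10 (l / 10 ^ d) := by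
      rw [PySem.List.slice_zero_start, PySem.List.slice_to_natCast, ← f6, td_take f5]
    have e3 : PySem.List.slice (Nat.toDigits 10 l) (some (Dc : Int)) none = tailChars d l := by
      rw [PySem.List.slice_from_natCast, ← f6, td_drop f5]
    rw [e1, e2, e3, parse_toDigits, tailChars_length]
    simp only [Option.getD_some]
    -- shared arithmetic facts
    have g1 : (c + 1) * 10 ^ d = c * 10 ^ d + 10 ^ d := by ring
    have g2 : 1 ≤ 10 ^ d := Nat.one_le_pow _ _ (by norm_num)
    have gDl : Dl ≤ l := td_len_le hl1
    have gsucc : (10:Nat) ^ (d + 1) = 10 ^ d * 10 := pow_succ 10 d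
    have g1s : (c + 1) * 10 ^ (d + 1) = c * 10 ^ (d + 1) + 10 ^ (d + 1) := by ring
    have g10 : (10:Nat) ≤ 10 ^ (d + 1) := by
      calc (10:Nat) = 10 ^ 1 := (pow_one 10).symm
      _ ≤ 10 ^ (d + 1) := Nat.pow_le_pow_right (by norm_num) (by omega)
    have gmin : ∀ e : Nat, 1 ≤ e → e < d → (c + 1) * 10 ^ e ≤ l + 1 := by
      intro e _ he
      have h5 : (c + 1) * 10 ^ e ≤ 10 ^ Dc * 10 ^ e := Nat.mul_le_mul_right _ (by omega)
      have h6 : (10:Nat) ^ Dc * 10 ^ e = 10 ^ (Dc + e) := by rw [← pow_add]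
      have h7 : (10:Nat) ^ (Dc + e) ≤ 10 ^ (Dl - 1) := Nat.pow_le_pow_right (by norm_num) (by omega)
      omega
    have gbig : 10 ^ Dl ≤ c * 10 ^ (d + 1) := by
      have h5 : 10 ^ (Dc - 1) * 10 ^ (d + 1) ≤ c * 10 ^ (d + 1) := Nat.mul_le_mul_right _ f2a
      have h6 : (10:Nat) ^ (Dc - 1) * 10 ^ (d + 1) = 10 ^ (Dc - 1 + (d + 1)) := by rw [← pow_add]
      have h7 : Dc - 1 + (d + 1) = Dl := by omega
      rw [h7] at h6
      omega
    split_ifs with h1 h2 h3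
    · -- new_item > last : estar = d
      have n1 : l < c * 10 ^ d := by exact_mod_cast h1
      have hd1 : 1 ≤ d := by
        by_contra hh
        have hz : d = 0 := by omega
        rw [hz, pow_zero, Nat.mul_one] at n1
        omega
      rw [altGo_spec_nat c l d (by omega) gmin hd1 (by omega)]
      rw [if_pos n1]
      rw [Prod.mk.injEq]
      exact ⟨by push_cast; ring, by omega⟩
    · -- prefix > current : estar = d + 1
      have n1 : c * 10 ^ d ≤ l := by
        by_contra hh
        exact h1 (by exact_mod_cast (by omega : l < c * 10 ^ d))
      have n2 : (c + 1) * 10 ^ d ≤ l := by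
        have h2' : c < l / 10 ^ d := by exact_mod_cast h2
        have := (Nat.le_div_iff_mul_le (show 0 < 10 ^ d by positivity)).mp (by omega : c + 1 ≤ l / 10 ^ d)
        omega
      rw [altGo_spec_nat c l (d + 1) (by omega) 
            (fun e he1 he2 => by
              by_cases hed : e = d
              · subst hed; omega
              · exact gmin e he1 (by omega))
            (by omega) (by omega)]
      rw [if_pos (by omega)]
      rw [Prod.mk.injEq]
      exact ⟨by push_cast [gsucc]; ring, by omega⟩
    · -- all nines : estar = d + 1
      have n1 : c * 10 ^ d ≤ l := by
        by_contra hh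
        exact h1 (by exact_mod_cast (by omega : l < c * 10 ^ d))
      have n3 : l % 10 ^ d = 10 ^ d - 1 := (tailChars_nines d l).mp (by simpa using h3)
      have hdm := Nat.div_add_mod l (10 ^ d)
      have hq2 : l / 10 ^ d ≤ c := by
        by_contra hh
        exact h2 (by exact_mod_cast (by omega : c < l / 10 ^ d))
      have hq1 : c ≤ l / 10 ^ d := by
        rw [Nat.le_div_iff_mul_le (show 0 < 10 ^ d by positivity)]
        omega
      have hqc : l / 10 ^ d = c := by omega
      rw [hqc] at hdm
      have hring : (c + 1) * 10 ^ d = 10 ^ d * c + 10 ^ d := by ring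
      have hlv : l + 1 = (c + 1) * 10 ^ d := by omega
      have hcond : l + 2 ≤ (c + 1) * 10 ^ (d + 1) := by
        have h8 : (c + 1) * 10 ^ (d + 1) = (c + 1) * 10 ^ d * 10 := by rw [gsucc]; ring
        have hp : 0 < (c + 1) * 10 ^ d := Nat.mul_pos (by omega) (by positivity)
        omega
      rw [altGo_spec_nat c l (d + 1) hcond
            (fun e he1 he2 => by
              by_cases hed : e = d
              · subst hed; omega
              · exact gmin e he1 (by omega))
            (by omega) (by omega)]
      rw [if_pos (by omega)]
      rw [Prod.mk.injEq]
      exact ⟨by push_cast [gsucc]; ring, by omega⟩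
    · -- else : estar = d
      have n1 : c * 10 ^ d ≤ l := by
        by_contra hh
        exact h1 (by exact_mod_cast (by omega : l < c * 10 ^ d))
      have n3 : l % 10 ^ d ≠ 10 ^ d - 1 := fun hh => (by simpa using h3 : ¬ _) ((tailChars_nines d l).mpr hh)
      have hdm := Nat.div_add_mod l (10 ^ d)
      have hmod := Nat.mod_lt l (show 0 < 10 ^ d by positivity)
      have hq2 : l / 10 ^ d ≤ c := by
        by_contra hh
        exact h2 (by exact_mod_cast (by omega : c < l / 10 ^ d))
      have hq1 : c ≤ l / 10 ^ d := by
        rw [Nat.le_div_iff_mul_le (show 0 < 10 ^ d by positivity)]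
        omega
      have hqc : l / 10 ^ d = c := by omega
      rw [hqc] at hdm
      have hring : (c + 1) * 10 ^ d = 10 ^ d * c + 10 ^ d := by ring
      have hcond : l + 2 ≤ (c + 1) * 10 ^ d := by omega
      have hd1 : 1 ≤ d := by
        by_contra hh
        have hz : d = 0 := by omega
        rw [hz, pow_zero] at n3
        omega
      rw [altGo_spec_nat c l d hcond gmin hd1 (by omega)]
      rw [if_neg (by omega)]
      rw [Prod.mk.injEq]
      exact ⟨rfl, by omega⟩

theorem helper_fst_pos (cur last : Int) (hc : 1 ≤ cur) (hl : 1 ≤ last) :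
    1 ≤ (computeMinOps2 cur last).1 := by
  simp only [computeMinOps2]
  split_ifs <;> simp only []
  · omega
  · have : 0 < cur * 10 ^ ((PySem.List.len (PySem.Int.toChars last) - PySem.List.len (PySem.Int.toChars cur)).toNat) := by positivity
    omega
  · have : 0 < cur * 10 ^ ((PySem.List.len (PySem.Int.toChars last) - PySem.List.len (PySem.Int.toChars cur)).toNat) * 10 := by positivity
    omega
  · have : 0 < cur * 10 ^ ((PySem.List.len (PySem.Int.toChars last) - PySem.List.len (PySem.Int.toChars cur)).toNat) * 10 := by positivity
    omega
  · omega

theorem loop_eq : ∀ (k : Nat) (a n : Int) (lst : List Int) (acc : Int),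
    (n - a).toNat = k → 1 ≤ a → n ≤ (lst.length : Int) →
    (∀ x ∈ lst.take n.toNat, 1 ≤ x) →
    ((PySem.List.pyRange a n 1).foldl
      (fun st i =>
        let last_item := PySem.List.pyGetD st.1 (i - 1) 0
        let current_item := PySem.List.pyGetD st.1 i 0
        let r := computeMinOps2 current_item last_item
        (PySem.List.pySetD st.1 i r.1, st.2 + r.2)) (lst, acc)) =
    ((PySem.List.pyRange a n 1).foldl
      (fun st i =>
        let last := PySem.List.pyGetD st.1 (i - 1) 0
        let cur := PySem.List.pyGetD st.1 i 0
        let r := if cur > last then (cur, (0 : Int)) else altGo cur last 1 (last.toNat + 2)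
        (PySem.List.pySetD st.1 i r.1, st.2 + r.2)) (lst, acc)) := by
  intro k
  induction k with
  | zero =>
    intro a n lst acc hk _ _ _
    rw [PySem.List.pyRange_one_eq_nil (by omega)]
    rfl
  | succ k ih =>
    intro a n lst acc hk ha hlen hinv
    have han : a < n := by omega
    rw [PySem.List.pyRange_one_cons han]
    simp only [List.foldl_cons]
    have ha0 : 0 ≤ a := by omega
    have ha1 : 0 ≤ a - 1 := by omega
    have haln : a < (lst.length : Int) := by omega
    have hat : a.toNat < lst.length := by omega
    have hat1 : (a - 1).toNat < lst.length := by omega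
    have hgc : PySem.List.pyGetD lst a 0 = lst[a.toNat] := PySem.List.pyGetD_eq_getElem lst 0 ha0 (by simpa using haln)
    have hgl : PySem.List.pyGetD lst (a - 1) 0 = lst[(a - 1).toNat] := PySem.List.pyGetD_eq_getElem lst 0 ha1 (by simp; omega)
    have hmemc : lst[a.toNat] ∈ lst.take n.toNat := by
      have h1 : a.toNat < n.toNat := by omega
      have : (lst.take n.toNat)[a.toNat]'(by simp; omega) = lst[a.toNat] := List.getElem_take
      rw [← this]
      exact List.getElem_mem _
    have hmeml : lst[(a-1).toNat] ∈ lst.take n.toNat := by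
      have h1 : (a-1).toNat < n.toNat := by omega
      have : (lst.take n.toNat)[(a-1).toNat]'(by simp; omega) = lst[(a-1).toNat] := List.getElem_take
      rw [← this]
      exact List.getElem_mem _
    have hcpos : 1 ≤ lst[a.toNat] := hinv _ hmemc
    have hlpos : 1 ≤ lst[(a-1).toNat] := hinv _ hmeml
    simp only [hgc, hgl]
    rw [helper_eq _ _ hcpos hlpos]
    have hrpos : 1 ≤ (computeMinOps2 lst[a.toNat] lst[(a-1).toNat]).1 :=
      helper_fst_pos _ _ hcpos hlpos
    rw [← helper_eq _ _ hcpos hlpos]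
    set r := computeMinOps2 lst[a.toNat] lst[(a-1).toNat] with hr
    have hset : PySem.List.pySetD lst a r.1 = lst.set a.toNat r.1 :=
      PySem.List.pySetD_of_nonneg lst r.1 ha0
    rw [hset]
    exact ih (a + 1) n (lst.set a.toNat r.1) (acc + r.2)
      (by omega) (by omega) (by simp; omega)
      (by
        intro x hx
        rw [List.take_set] at hx
        rcases List.mem_or_eq_of_mem_set hx with h | h
        · exact hinv x h
        · omega)

-- ===== VERDICT (by name: the statement is the Claim_ definition above) =====
theorem compute_spec : Claim_equal_compute := by
  intro n input_list _ hpre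
  unfold Spec_compute compute compute_alt
  by_cases h2 : 2 ≤ n
  · obtain ⟨hlen, hinv⟩ := hpre h2
    rw [loop_eq (n - 1).toNat 1 n input_list 0 rfl (by omega) hlen hinv]
  · rw [PySem.List.pyRange_one_eq_nil (show n ≤ 1 by omega)]
    rfl
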